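-- pv_equiv track=rewrite | github.com/gpsaggese/gpsaggese.github.io | tutorials/LangChain_LangGraph/langchain_utils.py | diff_checksum_snapshots
-- ===== SOURCE A (Python) =====
-- def diff_checksum_snapshots(
--     previous: dict[str, str], current: dict[str, str]
-- ) -> dict[str, list[str]]:
--     """
--     Diff two checksum snapshots and return changed file groups.
--     """
--     previous_paths = set(previous.keys())
--     current_paths = set(current.keys())
--     new_files = sorted(current_paths - previous_paths)
--     deleted_files = sorted(previous_paths - current_paths)
--     modified_files = sorted(
--         path
--         for path in (previous_paths & current_paths)
--         if previous[path] != current[path]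
--     )
--     return {
--         "new": new_files,
--         "modified": modified_files,
--         "deleted": deleted_files,
--     }
-- ===== SOURCE B (Python) =====
-- def diff_checksum_snapshots(
--     previous: dict[str, str], current: dict[str, str]
-- ) -> dict[str, list[str]]:
--     """
--     Diff two checksum snapshots by a single sorted-merge sweep: sort both
--     snapshots by path and advance two cursors, classifying each path as it
--     goes; the three output lists come out already sorted, so no final sort.
--     """
--     prev_items = sorted(previous.items(), key=lambda kv: kv[0])
--     cur_items = sorted(current.items(), key=lambda kv: kv[0])
--     new_files: list[str] = []
--     modified_files: list[str] = []
--     deleted_files: list[str] = []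
--     i, j = 0, 0
--     while i < len(prev_items) and j < len(cur_items):
--         pk, pv = prev_items[i]
--         ck, cv = cur_items[j]
--         if pk == ck:
--             if pv != cv:
--                 modified_files.append(pk)
--             i += 1
--             j += 1
--         elif pk < ck:
--             deleted_files.append(pk)
--             i += 1
--         else:
--             new_files.append(ck)
--             j += 1
--     new_files.extend(k for k, _ in cur_items[j:])
--     deleted_files.extend(k for k, _ in prev_items[i:])
--     return {
--         "new": new_files,
--         "modified": modified_files,
--         "deleted": deleted_files,
--     }
-- ===== Notes on version B (the rewrite author's own statement) =====
-- stated objective: alternative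
-- what changed: Replaces A's set algebra (key sets, differences, intersection, three final sorts) by a sort-then-merge sweep: both snapshots are sorted by path once and two cursors advance through them in a single while loop, classifying each path into new/modified/deleted as the merge goes, so the outputs emerge already sorted and no sets or final sorts exist. Pre_ excludes association lists with duplicate keys, on which the Python-dict (last value wins) and assoc-list (first match) readings of the input diverge.
import Mathlib
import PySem

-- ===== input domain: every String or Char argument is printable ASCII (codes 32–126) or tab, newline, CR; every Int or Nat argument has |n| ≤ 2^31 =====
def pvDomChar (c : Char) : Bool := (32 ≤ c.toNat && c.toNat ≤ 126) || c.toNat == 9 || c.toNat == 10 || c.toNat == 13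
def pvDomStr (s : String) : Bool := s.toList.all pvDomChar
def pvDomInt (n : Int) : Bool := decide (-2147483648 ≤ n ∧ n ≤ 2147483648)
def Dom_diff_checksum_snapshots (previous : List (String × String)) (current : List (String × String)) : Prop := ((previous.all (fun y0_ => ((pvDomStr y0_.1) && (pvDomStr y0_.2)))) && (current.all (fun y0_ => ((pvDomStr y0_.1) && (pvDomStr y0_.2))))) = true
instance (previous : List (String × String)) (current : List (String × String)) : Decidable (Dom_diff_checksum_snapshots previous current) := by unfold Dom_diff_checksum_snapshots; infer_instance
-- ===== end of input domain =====

-- B replaces A's set algebra (key sets, two set differences, a filtered intersection, three final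
-- sorts) by a single sorted-merge sweep with two cursors whose outputs emerge already sorted.

-- ===== PORT A =====
-- previous[path] / current[path] are ported as Dict.get?; on every reached path the key is present
-- (path comes from the key intersection), so the Option comparison equals Python's value comparison.
def diff_checksum_snapshots (previous : List (String × String)) (current : List (String × String)) : List (String × List String) :=
  let prev := PySem.Dict.mk previous
  let cur := PySem.Dict.mk current
  let previous_paths : PySem.Set String := PySem.Set.ofList prev.keys
  let current_paths : PySem.Set String := PySem.Set.ofList cur.keys
  let new_files := PySem.List.sorted (PySem.Set.diff current_paths previous_paths) (fun x => x) false
  let deleted_files := PySem.List.sorted (PySem.Set.diff previous_paths current_paths) (fun x => x) false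
  let modified_files := PySem.List.sorted
    ((PySem.Set.inter previous_paths current_paths).filter (fun path => prev.get? path != cur.get? path))
    (fun x => x) false
  [("new", new_files), ("modified", modified_files), ("deleted", deleted_files)]

-- ===== PORT B =====
-- the while loop over cursors i, j into the two sorted item lists becomes structural recursion on
-- the two remaining suffixes, carrying the three accumulator lists; the trailing 'extend's are the
-- two base cases (exactly one of them is nonempty when the loop stops).
def pvMergeLoop : List (String × String) → List (String × String) → List String → List String → List String → List String × List String × List String
  | [], cs, nf, mf, df => (nf ++ cs.map Prod.fst, mf, df)
  | p :: ps, [], nf, mf, df => (nf, mf, df ++ (p :: ps).map Prod.fst)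
  | (pk, pv) :: ps, (ck, cv) :: cs, nf, mf, df =>
    if pk = ck then pvMergeLoop ps cs nf (if pv ≠ cv then mf ++ [pk] else mf) df
    else if pk < ck then pvMergeLoop ps ((ck, cv) :: cs) nf mf (df ++ [pk])
    else pvMergeLoop ((pk, pv) :: ps) cs (nf ++ [ck]) mf df
termination_by ps cs _ _ _ => ps.length + cs.length

def diff_checksum_snapshots_alt (previous : List (String × String)) (current : List (String × String)) : List (String × List String) :=
  let prev_items := PySem.List.sorted (PySem.Dict.mk previous).items Prod.fst false
  let cur_items := PySem.List.sorted (PySem.Dict.mk current).items Prod.fst false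
  let r := pvMergeLoop prev_items cur_items [] [] []
  [("new", r.1), ("modified", r.2.1), ("deleted", r.2.2)]

-- ===== PRECONDITION & SPEC =====
-- Pre_ excludes association lists with duplicate keys: a Python dict cannot hold them (building the
-- dict keeps the LAST value) while the assoc-list convention reads the FIRST match — a defensible
-- corner whose reading neither implementation owns.
def Pre_diff_checksum_snapshots (previous : List (String × String)) (current : List (String × String)) : Prop :=
  (previous.map Prod.fst).Nodup ∧ (current.map Prod.fst).Nodup
instance (previous : List (String × String)) (current : List (String × String)) : Decidable (Pre_diff_checksum_snapshots previous current) := by unfold Pre_diff_checksum_snapshots; infer_instance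
def pvWitness_diff_checksum_snapshots : (List (String × String)) × (List (String × String)) :=
  ([("a.py", "1"), ("b.py", "2")], [("b.py", "3"), ("c.py", "4")])

def Spec_diff_checksum_snapshots (previous : List (String × String)) (current : List (String × String)) (out : List (String × List String)) : Prop := out = diff_checksum_snapshots_alt previous current
instance (previous : List (String × String)) (current : List (String × String)) (out : List (String × List String)) : Decidable (Spec_diff_checksum_snapshots previous current out) := by unfold Spec_diff_checksum_snapshots; infer_instance

-- ===== CLAIM (what is proved, stated in full; the proofs are below) =====
def Claim_equal_diff_checksum_snapshots : Prop := ∀ (previous : List (String × String)) (current : List (String × String)), Dom_diff_checksum_snapshots previous current → Pre_diff_checksum_snapshots previous current → Spec_diff_checksum_snapshots previous current (diff_checksum_snapshots previous current)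

-- ===== LEMMAS AND PROOFS =====

-- lookup skips a cons whose key differs
theorem pv_lookup_cons_ne (x v : String) (l : List (String × String)) (c1 : String) (h : c1 ≠ x) :
    List.lookup c1 ((x, v) :: l) = List.lookup c1 l := by
  rw [List.lookup_cons]; simp [show (c1 == x) = false by simpa using h]

theorem pvMergeLoop_spec (ps cs : List (String × String)) (nf mf df : List String)
    (hp : ps.Pairwise (fun a b => a.1 < b.1)) (hc : cs.Pairwise (fun a b => a.1 < b.1)) :
    pvMergeLoop ps cs nf mf df =
      (nf ++ (cs.filter (fun c => (List.lookup c.1 ps).isNone)).map Prod.fst,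
       mf ++ (cs.filter (fun c => (List.lookup c.1 ps).any (fun v => v ≠ c.2))).map Prod.fst,
       df ++ (ps.filter (fun p => (List.lookup p.1 cs).isNone)).map Prod.fst) := by
  fun_induction pvMergeLoop ps cs nf mf df with
  | case1 cs nf mf df => simp
  | case2 p ps nf mf df => simp
  | case3 pval ptail key cval ctail nf mf df ih =>
    rw [List.pairwise_cons] at hp hc
    have hne1 : ∀ c ∈ ctail, c.1 ≠ key := fun c hcm e => absurd (hc.1 c hcm) (by simp [e])
    have hne2 : ∀ p ∈ ptail, p.1 ≠ key := fun p hpm e => absurd (hp.1 p hpm) (by simp [e])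
    have h1 : List.filter (fun c => (List.lookup c.1 ((key, pval) :: ptail)).isNone) ctail
        = List.filter (fun c => (List.lookup c.1 ptail).isNone) ctail :=
      List.filter_congr (fun c hcm => by rw [pv_lookup_cons_ne key pval ptail c.1 (hne1 c hcm)])
    have h2 : List.filter (fun c => (List.lookup c.1 ((key, pval) :: ptail)).any (fun v => v ≠ c.2)) ctail
        = List.filter (fun c => (List.lookup c.1 ptail).any (fun v => v ≠ c.2)) ctail :=
      List.filter_congr (fun c hcm => by rw [pv_lookup_cons_ne key pval ptail c.1 (hne1 c hcm)])
    have h3 : List.filter (fun p => (List.lookup p.1 ((key, cval) :: ctail)).isNone) ptail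
        = List.filter (fun p => (List.lookup p.1 ctail).isNone) ptail :=
      List.filter_congr (fun p hpm => by rw [pv_lookup_cons_ne key cval ctail p.1 (hne2 p hpm)])
    simp only [dite_eq_ite] at ih
    rw [ih hp.2 hc.2]
    simp only [List.filter_cons]
    rw [h1, h2, h3]
    simp only [List.lookup_cons, beq_self_eq_true, Option.isNone_some, Option.any_some]
    by_cases hv : pval = cval <;> simp [hv]
  | case4 pk pval ps ck cval cs nf mf df hne hlt ih =>
    rw [List.pairwise_cons] at hp
    rw [ih hp.2 hc]
    have hcall : ∀ c ∈ (ck, cval) :: cs, pk < c.1 := by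
      intro c hcm
      rcases List.mem_cons.mp hcm with h | h
      · simp [h, hlt]
      · exact lt_trans hlt (by simpa using (List.pairwise_cons.mp hc).1 c h)
    have hkne : ∀ c ∈ (ck, cval) :: cs, c.1 ≠ pk := fun c hcm e => absurd (hcall c hcm) (by simp [e])
    have h1 : List.filter (fun c => (List.lookup c.1 ((pk, pval) :: ps)).isNone) ((ck, cval) :: cs)
        = List.filter (fun c => (List.lookup c.1 ps).isNone) ((ck, cval) :: cs) :=
      List.filter_congr (fun c hcm => by rw [pv_lookup_cons_ne pk pval ps c.1 (hkne c hcm)])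
    have h2 : List.filter (fun c => (List.lookup c.1 ((pk, pval) :: ps)).any (fun v => v ≠ c.2)) ((ck, cval) :: cs)
        = List.filter (fun c => (List.lookup c.1 ps).any (fun v => v ≠ c.2)) ((ck, cval) :: cs) :=
      List.filter_congr (fun c hcm => by rw [pv_lookup_cons_ne pk pval ps c.1 (hkne c hcm)])
    have h3 : List.lookup pk ((ck, cval) :: cs) = none :=
      List.lookup_eq_none_iff.mpr (fun q hq => by simpa using (hkne q hq ·.symm))
    rw [h1, h2]
    simp [List.filter_cons, h3]
  | case5 pk pval ps ck cval cs nf mf df hne hnlt ih =>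
    rw [List.pairwise_cons] at hc
    rw [ih hp hc.2]
    have hck : ck < pk := by
      rcases lt_trichotomy pk ck with h' | h' | h'
      · exact absurd h' hnlt
      · exact absurd h' hne
      · exact h'
    have hpall : ∀ p ∈ (pk, pval) :: ps, ck < p.1 := by
      intro p hpm
      rcases List.mem_cons.mp hpm with h | h
      · simp [h, hck]
      · exact lt_trans hck (by simpa using (List.pairwise_cons.mp hp).1 p h)
    have hkne : ∀ p ∈ (pk, pval) :: ps, p.1 ≠ ck := fun p hpm e => absurd (hpall p hpm) (by simp [e])
    have h3 : List.filter (fun p => (List.lookup p.1 ((ck, cval) :: cs)).isNone) ((pk, pval) :: ps)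
        = List.filter (fun p => (List.lookup p.1 cs).isNone) ((pk, pval) :: ps) :=
      List.filter_congr (fun p hpm => by rw [pv_lookup_cons_ne ck cval cs p.1 (hkne p hpm)])
    have h1 : List.lookup ck ((pk, pval) :: ps) = none :=
      List.lookup_eq_none_iff.mpr (fun q hq => by simpa using (hkne q hq ·.symm))
    rw [h3]
    simp [List.filter_cons, h1]

theorem pv_lookup_none_iff (k : String) (l : List (String × String)) :
    List.lookup k l = none ↔ k ∉ l.map Prod.fst := by
  rw [List.lookup_eq_none_iff]
  simp [List.mem_map]
  aesop

theorem pv_lookup_some_iff (l : List (String × String)) (hn : (l.map Prod.fst).Nodup)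
    (k : String) (v : String) : List.lookup k l = some v ↔ (k, v) ∈ l := by
  induction l with
  | nil => simp
  | cons a t ih =>
    simp only [List.map_cons, List.nodup_cons] at hn
    obtain ⟨a1, a2⟩ := a
    rw [List.lookup_cons]
    by_cases hk : k = a1
    · subst hk
      simp only [beq_self_eq_true]
      constructor
      · rintro h; simp at h; simp [h]
      · intro h
        rcases List.mem_cons.mp h with h | h
        · simp at h; simp [h]
        · exact absurd (List.mem_map.mpr ⟨_, h, rfl⟩) hn.1
    · simp [show (k == a1) = false by simpa using hk, ih hn.2, hk]

theorem pv_lookup_perm (l₁ l₂ : List (String × String)) (h : l₁.Perm l₂)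
    (hn : (l₁.map Prod.fst).Nodup) (k : String) : List.lookup k l₁ = List.lookup k l₂ := by
  have hn2 : (l₂.map Prod.fst).Nodup := ((h.map Prod.fst).nodup_iff).mp hn
  cases h1 : List.lookup k l₁ with
  | none =>
    rw [pv_lookup_none_iff] at h1
    exact ((pv_lookup_none_iff k l₂).mpr (fun hm => h1 (((h.map Prod.fst).mem_iff).mpr hm))).symm
  | some v =>
    rw [pv_lookup_some_iff l₁ hn] at h1
    exact ((pv_lookup_some_iff l₂ hn2 k v).mpr (h.mem_iff.mp h1)).symm

theorem pv_get?_eq_lookup (l : List (String × String)) (k : String) :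
    (PySem.Dict.mk l).get? k = List.lookup k l := by
  induction l with
  | nil => rfl
  | cons a t ih =>
    obtain ⟨a1, a2⟩ := a
    rw [PySem.Dict.get?_mk_cons, List.lookup_cons]
    by_cases hk : a1 = k
    · simp [hk]
    · simp [show (a1 == k) = false by simpa using hk,
        show (k == a1) = false by simpa using (Ne.symm hk), ih]

theorem pv_pairwise_strict (l : List (String × String))
    (h1 : l.Pairwise (fun a b => a.1 ≤ b.1)) (h2 : (l.map Prod.fst).Nodup) :
    l.Pairwise (fun a b => a.1 < b.1) := by
  have hne : l.Pairwise (fun a b => a.1 ≠ b.1) := (List.pairwise_map.mp h2)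
  exact (h1.and hne).imp (fun h => lt_of_le_of_ne h.1 h.2)

theorem pv_filtermap_nodup (l : List (String × String)) (p : String × String → Bool)
    (h : (l.map Prod.fst).Nodup) : ((l.filter p).map Prod.fst).Nodup :=
  h.sublist (List.Sublist.map Prod.fst List.filter_sublist)

theorem pv_comp_new (P C : List (String × String))
    (hp : (P.map Prod.fst).Nodup) (hc : (C.map Prod.fst).Nodup) :
    PySem.List.sorted (PySem.Set.diff (PySem.Set.ofList (C.map Prod.fst)) (PySem.Set.ofList (P.map Prod.fst))) (fun x => x) false
    = ((PySem.List.sorted C Prod.fst false).filter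
        (fun c => (List.lookup c.1 (PySem.List.sorted P Prod.fst false)).isNone)).map Prod.fst := by
  have hCperm := PySem.List.sorted_perm C Prod.fst false
  have hPperm := PySem.List.sorted_perm P Prod.fst false
  have hcn : ((PySem.List.sorted C Prod.fst false).map Prod.fst).Nodup :=
    ((hCperm.map Prod.fst).nodup_iff).mpr hc
  have hpn : ((PySem.List.sorted P Prod.fst false).map Prod.fst).Nodup :=
    ((hPperm.map Prod.fst).nodup_iff).mpr hp
  apply PySem.List.sorted_id_eq_of_perm_of_pairwise
  · apply (List.perm_ext_iff_of_nodup (pv_filtermap_nodup _ _ hcn)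
      (PySem.Set.nodup_diff _ _ (PySem.Set.nodup_ofList _))).mpr
    intro a
    simp only [List.mem_map, List.mem_filter, PySem.Set.mem_diff, PySem.Set.mem_ofList]
    constructor
    · rintro ⟨c, ⟨hcm, hpred⟩, rfl⟩
      refine ⟨⟨c, hCperm.mem_iff.mp hcm, rfl⟩, ?_⟩
      rw [Option.isNone_iff_eq_none, pv_lookup_perm _ P hPperm hpn, pv_lookup_none_iff] at hpred
      simpa using hpred
    · rintro ⟨hmem, hnm⟩
      obtain ⟨c, hcm, rfl⟩ := hmem
      refine ⟨c, ⟨hCperm.mem_iff.mpr hcm, ?_⟩, rfl⟩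
      rw [Option.isNone_iff_eq_none, pv_lookup_perm _ P hPperm hpn, pv_lookup_none_iff]
      simpa using hnm
  · exact List.pairwise_map.mpr
      (((pv_pairwise_strict _ (PySem.List.sorted_pairwise C Prod.fst) hcn).filter _).imp le_of_lt)

theorem pv_comp_del (P C : List (String × String))
    (hp : (P.map Prod.fst).Nodup) (hc : (C.map Prod.fst).Nodup) :
    PySem.List.sorted (PySem.Set.diff (PySem.Set.ofList (P.map Prod.fst)) (PySem.Set.ofList (C.map Prod.fst))) (fun x => x) false
    = ((PySem.List.sorted P Prod.fst false).filter
        (fun p => (List.lookup p.1 (PySem.List.sorted C Prod.fst false)).isNone)).map Prod.fst :=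
  pv_comp_new C P hc hp

theorem pv_comp_mod (P C : List (String × String))
    (hp : (P.map Prod.fst).Nodup) (hc : (C.map Prod.fst).Nodup) :
    PySem.List.sorted ((PySem.Set.inter (PySem.Set.ofList (P.map Prod.fst)) (PySem.Set.ofList (C.map Prod.fst))).filter
        (fun path => (PySem.Dict.mk P).get? path != (PySem.Dict.mk C).get? path)) (fun x => x) false
    = ((PySem.List.sorted C Prod.fst false).filter
        (fun c => (List.lookup c.1 (PySem.List.sorted P Prod.fst false)).any (fun v => v ≠ c.2))).map Prod.fst := by
  have hCperm := PySem.List.sorted_perm C Prod.fst false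
  have hPperm := PySem.List.sorted_perm P Prod.fst false
  have hcn : ((PySem.List.sorted C Prod.fst false).map Prod.fst).Nodup :=
    ((hCperm.map Prod.fst).nodup_iff).mpr hc
  have hpn : ((PySem.List.sorted P Prod.fst false).map Prod.fst).Nodup :=
    ((hPperm.map Prod.fst).nodup_iff).mpr hp
  apply PySem.List.sorted_id_eq_of_perm_of_pairwise
  · apply (List.perm_ext_iff_of_nodup (pv_filtermap_nodup _ _ hcn)
      ((PySem.Set.nodup_inter _ _ (PySem.Set.nodup_ofList _)).filter _)).mpr
    intro a
    simp only [List.mem_map, List.mem_filter, PySem.Set.mem_inter, PySem.Set.mem_ofList]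
    constructor
    · rintro ⟨c, ⟨hcm, hpred⟩, rfl⟩
      obtain ⟨v, hv, hvne⟩ : ∃ v, List.lookup c.1 (PySem.List.sorted P Prod.fst false) = some v ∧ v ≠ c.2 := by
        cases hl : List.lookup c.1 (PySem.List.sorted P Prod.fst false) with
        | none => rw [hl] at hpred; simp at hpred
        | some v => rw [hl] at hpred; simp at hpred; exact ⟨v, rfl, hpred⟩
      have hPl : List.lookup c.1 P = some v := by
        rw [← pv_lookup_perm _ P hPperm hpn]; exact hv
      have hCl : List.lookup c.1 C = some c.2 :=
        (pv_lookup_some_iff C hc c.1 c.2).mpr (by simpa using hCperm.mem_iff.mp hcm)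
      refine ⟨⟨⟨(c.1, v), (pv_lookup_some_iff P hp _ _).mp hPl, rfl⟩,
        ⟨c, hCperm.mem_iff.mp hcm, rfl⟩⟩, ?_⟩
      rw [pv_get?_eq_lookup, pv_get?_eq_lookup, hPl, hCl]
      simpa using hvne
    · rintro ⟨⟨hmp, hmc⟩, hbne⟩
      obtain ⟨w', hw'⟩ : ∃ w', List.lookup a C = some w' := by
        cases hl : List.lookup a C with
        | none =>
          obtain ⟨x, hx, hxa⟩ := hmc
          exact absurd (List.mem_map.mpr ⟨x, hx, hxa⟩) ((pv_lookup_none_iff a C).mp hl)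
        | some w' => exact ⟨w', rfl⟩
      obtain ⟨w, hw⟩ : ∃ w, List.lookup a P = some w := by
        cases hl : List.lookup a P with
        | none =>
          obtain ⟨x, hx, hxa⟩ := hmp
          exact absurd (List.mem_map.mpr ⟨x, hx, hxa⟩) ((pv_lookup_none_iff a P).mp hl)
        | some w => exact ⟨w, rfl⟩
      have hwne : w ≠ w' := by
        rw [pv_get?_eq_lookup, pv_get?_eq_lookup, hw, hw'] at hbne
        simpa using hbne
      refine ⟨(a, w'), ⟨hCperm.mem_iff.mpr ((pv_lookup_some_iff C hc a w').mp hw'), ?_⟩, rfl⟩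
      rw [show List.lookup (a, w').1 (PySem.List.sorted P Prod.fst false) = some w by
        rw [pv_lookup_perm _ P hPperm hpn]; exact hw]
      simpa using hwne
  · exact List.pairwise_map.mpr
      (((pv_pairwise_strict _ (PySem.List.sorted_pairwise C Prod.fst) hcn).filter _).imp le_of_lt)

-- ===== VERDICT (by name: the statement is the Claim_ definition above) =====
theorem diff_checksum_snapshots_spec : Claim_equal_diff_checksum_snapshots := by
  intro previous current _ hpre
  obtain ⟨hp, hc⟩ := hpre
  unfold Spec_diff_checksum_snapshots
  show diff_checksum_snapshots previous current = diff_checksum_snapshots_alt previous current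
  have hpn : ((PySem.List.sorted previous Prod.fst false).map Prod.fst).Nodup :=
    (((PySem.List.sorted_perm previous Prod.fst false).map Prod.fst).nodup_iff).mpr hp
  have hcn : ((PySem.List.sorted current Prod.fst false).map Prod.fst).Nodup :=
    (((PySem.List.sorted_perm current Prod.fst false).map Prod.fst).nodup_iff).mpr hc
  unfold diff_checksum_snapshots diff_checksum_snapshots_alt
  simp only []
  rw [pvMergeLoop_spec _ _ _ _ _
        (pv_pairwise_strict _ (PySem.List.sorted_pairwise previous Prod.fst) hpn)
        (pv_pairwise_strict _ (PySem.List.sorted_pairwise current Prod.fst) hcn)]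
  rw [show (PySem.Dict.mk previous).keys = previous.map Prod.fst from rfl,
      show (PySem.Dict.mk current).keys = current.map Prod.fst from rfl]
  rw [pv_comp_new previous current hp hc, pv_comp_del previous current hp hc,
      pv_comp_mod previous current hp hc]
  simp
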